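-- pv_equiv track=rewrite | github.com/paciente23256/ccc-tool | vigenere_tool.py | obter_fatores
-- ===== SOURCE A (Python) =====
-- def obter_fatores(sequencia_espacamento):
--   fatores = []
--   fator_comum = []
--
--   for i in range(len(sequencia_espacamento)):
--     if sequencia_espacamento[i][1] not in fatores:
--       fatores.append(sequencia_espacamento[i][1])
--
--   #encontra os fatores
--   for fator in fatores:
--     for divisor in range(2, fator+1):
--       if (fator % divisor == 0):
--         fator_comum.append(divisor)
--
--   #conta quantas vezes cada fator aparece
--   contador = 0
--   qtd_fator = []
--   for fator in fator_comum:
--     for i in fator_comum: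
--       if fator == i:
--         contador += 1
--     if [fator, contador] not in qtd_fator:
--       qtd_fator.append([fator, contador])
--     contador = 0
--
--   return qtd_fator
-- ===== SOURCE B (Python) =====
-- def obter_fatores(sequencia_espacamento):
--     distintos = dict.fromkeys(item[1] for item in sequencia_espacamento)
--     contagem = {}
--     for v in distintos:
--         for d in range(2, v + 1):
--             if v % d == 0:
--                 contagem[d] = contagem.get(d, 0) + 1
--     return [[d, c] for d, c in contagem.items()]
-- ===== Notes on version B (the rewrite author's own statement) =====
-- stated objective: simpler
-- what changed: A concatenates all divisors of the distinct spacings into one list and then, for each element, rescans that whole list to count it and rescans the output for a dedup check; B dedups the spacings with dict.fromkeys and tallies each divisor once into an insertion-ordered counting dict, so the count-and-dedup rescan pass disappears.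
import Mathlib
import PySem

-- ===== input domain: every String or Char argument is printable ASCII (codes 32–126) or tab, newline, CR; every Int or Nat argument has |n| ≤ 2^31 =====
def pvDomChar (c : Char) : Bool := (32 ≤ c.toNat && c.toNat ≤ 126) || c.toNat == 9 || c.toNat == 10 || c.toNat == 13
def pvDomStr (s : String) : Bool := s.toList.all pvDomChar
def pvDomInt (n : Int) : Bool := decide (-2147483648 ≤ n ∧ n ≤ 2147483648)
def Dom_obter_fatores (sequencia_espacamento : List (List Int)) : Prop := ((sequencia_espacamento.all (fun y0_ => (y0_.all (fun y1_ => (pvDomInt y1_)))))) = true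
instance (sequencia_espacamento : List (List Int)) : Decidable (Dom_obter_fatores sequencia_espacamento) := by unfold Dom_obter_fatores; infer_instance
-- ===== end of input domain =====

-- B replaces A's count-and-dedup rescan pass over the concatenated divisor list by an
-- insertion-ordered counting dict built in one pass (and dedups the spacings with dict.fromkeys).

-- ===== PORT A =====
-- first loop: collect the distinct spacing values, in order of first appearance
def pvA_fatores (sequencia_espacamento : List (List Int)) : List Int :=
  (PySem.List.pyRange 0 (PySem.List.len sequencia_espacamento) 1).foldl
    (fun fat i =>
      let v := PySem.List.pyGetD (PySem.List.pyGetD sequencia_espacamento i []) 1 0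
      if v ∈ fat then fat else fat ++ [v]) []

-- second loop: append every divisor (from 2) of every fator
def pvA_fator_comum (fatores : List Int) : List Int :=
  fatores.foldl (fun fc fator =>
    (PySem.List.pyRange 2 (fator + 1) 1).foldl
      (fun fc divisor => if PySem.Int.mod fator divisor = 0 then fc ++ [divisor] else fc) fc) []

-- third loop: count each fator by an inner scan, append [fator, contador] if not present
def pvA_qtd (fator_comum : List Int) : List (List Int) :=
  fator_comum.foldl (fun qtd fator =>
    let contador : Int := fator_comum.foldl (fun c i => if fator = i then c + 1 else c) 0
    if [fator, contador] ∈ qtd then qtd else qtd ++ [[fator, contador]]) []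

def obter_fatores (sequencia_espacamento : List (List Int)) : List (List Int) :=
  pvA_qtd (pvA_fator_comum (pvA_fatores sequencia_espacamento))

-- ===== PORT B =====
-- distintos = dict.fromkeys(item[1] for item in sequencia_espacamento)
def pvB_distintos (sequencia_espacamento : List (List Int)) : List Int :=
  PySem.List.dedup (sequencia_espacamento.map (fun item => PySem.List.pyGetD item 1 0))

-- contagem[d] = contagem.get(d, 0) + 1 over the divisors of every distinct spacing
def pvB_contagem (distintos : List Int) : PySem.Dict Int Int :=
  distintos.foldl (fun d v =>
    (PySem.List.pyRange 2 (v + 1) 1).foldl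
      (fun d k => if PySem.Int.mod v k = 0 then d.insert k (d.getD k 0 + 1) else d) d)
    PySem.Dict.empty

def obter_fatores_alt (sequencia_espacamento : List (List Int)) : List (List Int) :=
  (pvB_contagem (pvB_distintos sequencia_espacamento)).items.map (fun p => [p.1, p.2])

-- ===== PRECONDITION & SPEC =====
-- Pre_ excludes exactly the inputs on which A raises IndexError: an inner list with fewer than
-- two elements (A reads sequencia_espacamento[i][1]).
def Pre_obter_fatores (sequencia_espacamento : List (List Int)) : Prop :=
  ∀ l ∈ sequencia_espacamento, 2 ≤ l.length
instance (sequencia_espacamento : List (List Int)) : Decidable (Pre_obter_fatores sequencia_espacamento) := by unfold Pre_obter_fatores; infer_instance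
def pvWitness_obter_fatores : List (List Int) := [[1, 6], [2, 4], [0, 6]]
def Spec_obter_fatores (sequencia_espacamento : List (List Int)) (out : List (List Int)) : Prop := out = obter_fatores_alt sequencia_espacamento
instance (sequencia_espacamento : List (List Int)) (out : List (List Int)) : Decidable (Spec_obter_fatores sequencia_espacamento out) := by unfold Spec_obter_fatores; infer_instance

-- ===== CLAIM (what is proved, stated in full; the proofs are below) =====
def Claim_equal_obter_fatores : Prop := ∀ (sequencia_espacamento : List (List Int)), Dom_obter_fatores sequencia_espacamento → Pre_obter_fatores sequencia_espacamento → Spec_obter_fatores sequencia_espacamento (obter_fatores sequencia_espacamento)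

-- ===== LEMMAS AND PROOFS =====

-- the divisor list of one fator, as both ports produce it
def pvDivs (fator : Int) : List Int :=
  (PySem.List.pyRange 2 (fator + 1) 1).filter (fun d => decide (PySem.Int.mod fator d = 0))

-- both ports read off the same distinct spacing values
theorem pv_fatores_eq_distintos (s : List (List Int)) : pvA_fatores s = pvB_distintos s := by
  unfold pvA_fatores pvB_distintos
  rw [PySem.List.foldl_pyRange_zero_pyGetD s []
        (fun fat item => if PySem.List.pyGetD item 1 0 ∈ fat then fat
                         else fat ++ [PySem.List.pyGetD item 1 0]) [],
      PySem.List.dedup_eq_ofList, PySem.Set.ofList_eq_foldl, List.foldl_map]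
  exact PySem.List.foldl_congr_mem s _ _ []
    (fun acc x _ => (PySem.Set.add_eq_ite acc (PySem.List.pyGetD x 1 0)).symm)

-- A's second loop concatenates the divisor lists
theorem pv_fator_comum_eq_flatMap (F : List Int) : pvA_fator_comum F = F.flatMap pvDivs := by
  unfold pvA_fator_comum
  have h : ∀ (acc : List Int), ∀ f ∈ F,
      (PySem.List.pyRange 2 (f + 1) 1).foldl
        (fun fc divisor => if PySem.Int.mod f divisor = 0 then fc ++ [divisor] else fc) acc
      = acc ++ pvDivs f := by
    intro acc f _
    exact PySem.List.foldl_append_ite_eq_filter (fun d => PySem.Int.mod f d = 0) _ acc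
  rw [PySem.List.foldl_congr_mem F _ (fun fc fator => fc ++ pvDivs fator) [] h,
      PySem.List.foldl_append_eq_flatMap]
  simp

-- B's dict is the Counter of the concatenated divisor list
theorem pv_contagem_eq_counter (F : List Int) :
    pvB_contagem F = PySem.Dict.counter (F.flatMap pvDivs) := by
  unfold pvB_contagem
  have h : ∀ (d : PySem.Dict Int Int), ∀ v ∈ F,
      (PySem.List.pyRange 2 (v + 1) 1).foldl
        (fun d k => if PySem.Int.mod v k = 0 then d.insert k (d.getD k 0 + 1) else d) d
      = (pvDivs v).foldl (fun d k => d.insert k (d.getD k 0 + 1)) d := by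
    intro d v _
    exact PySem.List.foldl_ite_eq_foldl_filter (fun k => PySem.Int.mod v k = 0) _ _ d
  rw [PySem.List.foldl_congr_mem F _
        (fun d v => (pvDivs v).foldl (fun d k => d.insert k (d.getD k 0 + 1)) d)
        PySem.Dict.empty h,
      ← List.foldl_flatMap, PySem.Dict.foldl_insert_getD_add_one_eq_counter]

-- A's hand-rolled counting loop is List.count.
theorem pv_contador_eq_count (fc : List Int) (fator : Int) :
    fc.foldl (fun c i => if fator = i then c + 1 else c) 0 = (fc.count fator : Int) := by
  rw [PySem.List.foldl_ite_add_one (p := fun i => fator = i)]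
  have : (fun (x : Int) => decide (fator = x)) = (fun x => x == fator) := by
    funext x
    by_cases h : fator = x
    · simp [h]
    · simp [h, Ne.symm h]
  rw [this]
  simp [List.count]

-- A's dedup-append pass, seeded with the image of a prefix, produces the image of Set.ofList.
theorem pv_qtd_fold (g : Int → List Int) (hg : ∀ a b, g a = g b → a = b) :
    ∀ (rest pre : List Int),
      rest.foldl (fun qtd f => if g f ∈ qtd then qtd else qtd ++ [g f])
          ((PySem.Set.ofList pre).map g)
        = (PySem.Set.ofList (pre ++ rest)).map g := by
  intro rest
  induction rest with
  | nil => simp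
  | cons f rest ih =>
    intro pre
    have hmem : (g f ∈ (PySem.Set.ofList pre).map g) ↔ f ∈ PySem.Set.ofList pre := by
      constructor
      · intro h
        rcases List.mem_map.mp h with ⟨a, ha, hEq⟩
        exact (hg a f hEq) ▸ ha
      · intro h; exact List.mem_map.mpr ⟨f, h, rfl⟩
    have hstep : pre ++ f :: rest = (pre ++ [f]) ++ rest := by simp
    rw [List.foldl_cons, hstep]
    by_cases hf : f ∈ PySem.Set.ofList pre
    · rw [if_pos (hmem.mpr hf)]
      have hset : PySem.Set.ofList (pre ++ [f]) = PySem.Set.ofList pre := by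
        rw [PySem.Set.ofList_append_singleton, PySem.Set.add_of_mem hf]
      have := ih (pre ++ [f])
      rw [hset] at this
      exact this
    · rw [if_neg (fun h => hf (hmem.mp h))]
      have hset : PySem.Set.ofList (pre ++ [f]) = PySem.Set.ofList pre ++ [f] := by
        rw [PySem.Set.ofList_append_singleton, PySem.Set.add_of_not_mem hf]
      have := ih (pre ++ [f])
      rw [hset, List.map_append] at this
      simpa using this

-- A's third pass, characterised: first-occurrence order, total counts.
theorem pv_qtd_eq_map (fc : List Int) :
    pvA_qtd fc = (PySem.Set.ofList fc).map (fun k => [k, (fc.count k : Int)]) := by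
  unfold pvA_qtd
  have h : ∀ (qtd : List (List Int)), ∀ fator ∈ fc,
      (let contador : Int := fc.foldl (fun c i => if fator = i then c + 1 else c) 0
       if [fator, contador] ∈ qtd then qtd else qtd ++ [[fator, contador]])
      = (if [fator, (fc.count fator : Int)] ∈ qtd then qtd
         else qtd ++ [[fator, (fc.count fator : Int)]]) := by
    intro qtd fator _
    simp only [pv_contador_eq_count]
  rw [PySem.List.foldl_congr_mem fc _
        (fun qtd fator => if [fator, (fc.count fator : Int)] ∈ qtd then qtd
                          else qtd ++ [[fator, (fc.count fator : Int)]]) [] h]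
  have := pv_qtd_fold (fun k => [k, (fc.count k : Int)])
      (fun a b hab => by simpa using (List.cons.injEq _ _ _ _ ▸ hab).1) fc []
  simpa using this

-- ===== VERDICT (by name: the statement is the Claim_ definition above) =====
theorem obter_fatores_spec : Claim_equal_obter_fatores := by
  intro s _ _
  unfold Spec_obter_fatores obter_fatores obter_fatores_alt
  rw [pv_fatores_eq_distintos, pv_fator_comum_eq_flatMap, pv_contagem_eq_counter,
      pv_qtd_eq_map, PySem.Dict.items_counter, List.map_map]
  rfl
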